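-- pv_equiv track=rewrite | github.com/YousefGh/Bioinformatics-I | motifsFinder.py | ApproximateHammingMatching
-- ===== SOURCE A (Python) =====
-- def hammingDistance(pattern_1, pattern_2):
--     '''
--     hamming distance is the difference between two patterns based on letters
--     1 letter mismatch will add 1 to the hamming distance
--
--     :param pattern_1: pattern in a genome
--     :param pattern_2: pattern in a genome
--     :return: integer representing hamming distance
--     '''
--     distance = 0
--     for i in range(len(pattern_1)):
--         if pattern_1[i] != pattern_2[i]:
--             distance += 1
--     return distance
--
-- def ApproximateHammingMatching(pattern, sequence, d):
--     '''
--     matches all similar patterns based on the hamming distance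
--     (letter differences)
--     :param pattern: string k-mer
--     :param sequence: long string (genome)
--     :param d: number of differing letters
--     :return: indexes array of all similar patters to pattern
--     '''
--
--     k = len(pattern)
--     indexes = []
--     for i in range(len(sequence) - k + 1):
--         nextPattern = sequence[i: i + k]
--         if hammingDistance(pattern, nextPattern) <= d:
--             indexes.append(i)
--     return indexes
-- ===== SOURCE B (Python) =====
-- def ApproximateHammingMatching(pattern, sequence, d):
--     k = len(pattern)
--     n = len(sequence) - k + 1
--     if n <= 0:
--         return []
--     counts = [0] * n
--     for j in range(k):
--         pj = pattern[j]
--         counts = [c + (sequence[i + j] != pj) for i, c in enumerate(counts)]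
--     return [i for i, c in enumerate(counts) if c <= d]
-- ===== Notes on version B (the rewrite author's own statement) =====
-- stated objective: alternative
-- what changed: B transposes the nesting: instead of computing a hamming distance per window via a helper, it sweeps pattern columns (outer) over all window starts (inner), maintaining a per-window mismatch-count array, and finally filters the enumerated counts.
import Mathlib
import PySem

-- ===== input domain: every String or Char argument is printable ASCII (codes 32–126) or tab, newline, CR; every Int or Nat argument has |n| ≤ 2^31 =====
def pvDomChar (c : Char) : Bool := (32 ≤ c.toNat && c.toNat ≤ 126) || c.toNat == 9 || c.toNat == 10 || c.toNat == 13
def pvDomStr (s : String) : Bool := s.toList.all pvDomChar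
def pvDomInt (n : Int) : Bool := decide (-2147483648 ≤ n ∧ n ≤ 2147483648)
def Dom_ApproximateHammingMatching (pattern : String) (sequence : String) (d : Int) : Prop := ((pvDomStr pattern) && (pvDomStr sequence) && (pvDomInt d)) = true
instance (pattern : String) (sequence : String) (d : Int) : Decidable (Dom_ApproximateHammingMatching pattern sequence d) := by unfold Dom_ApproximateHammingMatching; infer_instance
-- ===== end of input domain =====

-- B replaces A's window-by-window hamming-distance scan by a transposed column sweep
-- maintaining a per-window mismatch-count array (objective: alternative decomposition, same cost).

-- ===== PORT A =====
-- indexing via pyGetD is exact here: every index read inside ApproximateHammingMatching is in range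
def hammingDistance (pattern_1 : List Char) (pattern_2 : List Char) : Int :=
  (PySem.List.pyRange 0 (pattern_1.length : Int) 1).foldl
    (fun distance i =>
      if PySem.List.pyGetD pattern_1 i ' ' ≠ PySem.List.pyGetD pattern_2 i ' '
      then distance + 1 else distance) 0

def ApproximateHammingMatching (pattern : String) (sequence : String) (d : Int) : List Int :=
  let k : Int := (pattern.toList.length : Int)
  (PySem.List.pyRange 0 ((sequence.toList.length : Int) - k + 1) 1).foldl
    (fun indexes i =>
      let nextPattern := PySem.List.slice sequence.toList (some i) (some (i + k))
      if hammingDistance pattern.toList nextPattern ≤ d then indexes ++ [i] else indexes) []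

-- ===== PORT B =====
def ApproximateHammingMatching_alt (pattern : String) (sequence : String) (d : Int) : List Int :=
  let p := pattern.toList
  let s := sequence.toList
  let n : Int := (s.length : Int) - (p.length : Int) + 1
  if n ≤ 0 then []
  else
    let counts :=
      (PySem.List.pyRange 0 (p.length : Int) 1).foldl
        (fun counts j =>
          let pj := PySem.List.pyGetD p j ' '
          (PySem.List.enumerate counts).map
            (fun ic => ic.2 + (if PySem.List.pyGetD s (ic.1 + j) ' ' ≠ pj then (1 : Int) else 0)))
        (List.replicate n.toNat (0 : Int))
    ((PySem.List.enumerate counts).filter (fun ic => decide (ic.2 ≤ d))).map (fun ic => ic.1)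

-- ===== PRECONDITION & SPEC =====
def Spec_ApproximateHammingMatching (pattern : String) (sequence : String) (d : Int) (out : List Int) : Prop := out = ApproximateHammingMatching_alt pattern sequence d
instance (pattern : String) (sequence : String) (d : Int) (out : List Int) : Decidable (Spec_ApproximateHammingMatching pattern sequence d out) := by unfold Spec_ApproximateHammingMatching; infer_instance

-- ===== CLAIM (what is proved, stated in full; the proofs are below) =====
def Claim_equal_ApproximateHammingMatching : Prop := ∀ (pattern : String) (sequence : String) (d : Int), Dom_ApproximateHammingMatching pattern sequence d → Spec_ApproximateHammingMatching pattern sequence d (ApproximateHammingMatching pattern sequence d)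

-- ===== LEMMAS AND PROOFS =====

-- the per-cell mismatch indicator both programs count
def mism (p : List Char) (s : List Char) (i : Int) (j : Int) : Int :=
  if PySem.List.pyGetD s (i + j) ' ' ≠ PySem.List.pyGetD p j ' ' then 1 else 0

lemma enum_map_pyRange {α : Type} (n : Nat) (h : Int → α) :
    PySem.List.enumerate ((PySem.List.pyRange 0 (n : Int) 1).map h)
      = (PySem.List.pyRange 0 (n : Int) 1).map (fun q => (q, h q)) := by
  induction n with
  | zero => simp [PySem.List.pyRange_one_eq_nil (le_refl 0), PySem.List.enumerate_nil]
  | succ m ih =>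
      have hcast : ((m + 1 : Nat) : Int) = (m : Int) + 1 := by push_cast; ring
      rw [hcast, PySem.List.pyRange_one_succ_right (by positivity), List.map_append,
        PySem.List.enumerate_append, ih]
      simp [PySem.List.enumerate_cons, PySem.List.enumerate_nil,
        PySem.List.length_pyRange_one]

lemma cols_fold (p s : List Char) (n : Nat) (js : List Int) (h : Int → Int) :
    js.foldl
      (fun counts j =>
        (PySem.List.enumerate counts).map
          (fun ic => ic.2 + (if PySem.List.pyGetD s (ic.1 + j) ' ' ≠ PySem.List.pyGetD p j ' ' then (1 : Int) else 0)))
      ((PySem.List.pyRange 0 (n : Int) 1).map h)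
      = (PySem.List.pyRange 0 (n : Int) 1).map
          (fun i => h i + (js.map (fun j => mism p s i j)).sum) := by
  induction js generalizing h with
  | nil => simp
  | cons j js ih =>
      rw [List.foldl_cons, enum_map_pyRange, List.map_map]
      have hstep :
          ((fun ic : Int × Int => ic.2 + (if PySem.List.pyGetD s (ic.1 + j) ' ' ≠ PySem.List.pyGetD p j ' ' then (1 : Int) else 0)) ∘ fun q => (q, h q))
            = fun i => h i + mism p s i j := by
        funext i; simp [mism]
      rw [hstep, ih]
      refine List.map_congr_left (fun i _ => ?_)
      simp [add_assoc]

lemma ham_window (p s : List Char) (i : Int) (h0 : 0 ≤ i)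
    (h1 : i + (p.length : Int) ≤ (s.length : Int)) :
    hammingDistance p (PySem.List.slice s (some i) (some (i + (p.length : Int))))
      = ((PySem.List.pyRange 0 (p.length : Int) 1).map (fun j => mism p s i j)).sum := by
  have hb : (0 : Int) ≤ i + (p.length : Int) := by omega
  set w := PySem.List.slice s (some i) (some (i + (p.length : Int))) with hw
  have hwdef : w = List.take ((i + (p.length : Int)).toNat - i.toNat) (List.drop i.toNat s) := by
    rw [hw, PySem.List.slice_toNat s h0 hb]
  have htn : (i + (p.length : Int)).toNat - i.toNat = p.length := by omega
  have hilen : i.toNat + p.length ≤ s.length := by omega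
  have hwget : ∀ j : Int, 0 ≤ j → j < (p.length : Int) →
      PySem.List.pyGetD w j ' ' = PySem.List.pyGetD s (i + j) ' ' := by
    intro j hj0 hj1
    have hwlen : w.length = p.length := by
      rw [hwdef, htn]; simp; omega
    rw [PySem.List.pyGetD_eq_getElem w ' ' hj0 (by rw [hwlen]; omega),
      PySem.List.pyGetD_eq_getElem s ' ' (by omega) (by omega)]
    have hlt : j.toNat < ((i + (p.length : Int)).toNat - i.toNat) := by omega
    simp only [hwdef]
    rw [List.getElem_take, List.getElem_drop]
    congr 1
    omega
  unfold hammingDistance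
  have hbody :
      (fun (distance : Int) (idx : Int) =>
          if PySem.List.pyGetD p idx ' ' ≠ PySem.List.pyGetD w idx ' ' then distance + 1 else distance)
        = fun distance idx =>
            distance + (if PySem.List.pyGetD p idx ' ' ≠ PySem.List.pyGetD w idx ' ' then 1 else 0) := by
    funext distance idx; split <;> simp
  rw [hbody, PySem.List.foldl_add, zero_add]
  refine congrArg List.sum (List.map_congr_left (fun j hj => ?_))
  rw [PySem.List.mem_pyRange_one] at hj
  rw [hwget j hj.1 hj.2]
  simp [mism, ne_comm]

lemma final_filter {α : Type} (n : Nat) (f : Int → α) (q : α → Bool) :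
    (((PySem.List.pyRange 0 (n : Int) 1).map (fun i => (i, f i))).filter
        (fun ic => q ic.2)).map (fun ic => ic.1)
      = (PySem.List.pyRange 0 (n : Int) 1).filter (fun i => q (f i)) := by
  rw [List.filter_map, List.map_map]
  simp [Function.comp_def]

-- ===== VERDICT (by name: the statement is the Claim_ definition above) =====
theorem ApproximateHammingMatching_spec : Claim_equal_ApproximateHammingMatching := by
  intro pattern sequence d _
  unfold Spec_ApproximateHammingMatching ApproximateHammingMatching ApproximateHammingMatching_alt
  simp only []
  set p := pattern.toList
  set s := sequence.toList
  set N : Int := (s.length : Int) - (p.length : Int) + 1 with hN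
  by_cases hle : N ≤ 0
  · rw [if_pos hle, PySem.List.pyRange_one_eq_nil hle, List.foldl_nil]
  · rw [if_neg hle]
    have hNN : ((N.toNat : Nat) : Int) = N := by omega
    have hrepl : List.replicate N.toNat (0 : Int)
        = (PySem.List.pyRange 0 ((N.toNat : Nat) : Int) 1).map (fun _ => (0 : Int)) := by
      rw [List.map_const', PySem.List.length_pyRange_one]
      simp
      omega
    rw [hrepl, cols_fold, enum_map_pyRange]
    simp only [zero_add]
    rw [final_filter N.toNat (fun i => ((PySem.List.pyRange 0 (p.length : Int) 1).map (fun j => mism p s i j)).sum) (fun v => decide (v ≤ d))]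
    rw [PySem.List.foldl_append_ite_eq_filter
      (fun i => hammingDistance p (PySem.List.slice s (some i) (some (i + (p.length : Int)))) ≤ d)]
    rw [List.nil_append, hNN]
    refine List.filter_congr (fun i hi => ?_)
    rw [PySem.List.mem_pyRange_one] at hi
    rw [ham_window p s i hi.1 (by omega)]
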